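-- pv_equiv track=rewrite | github.com/andrew-qu2000/Schoolwork | cs1134/aq447_hw4/aq447_hw4_q6.py | appearances
-- ===== SOURCE A (Python) =====
-- def appearances(s,low,high):
--     if(low == high):
--         return {s[low]:1}
--     d = appearances(s,low + 1,high)
--     if s[low] in d:
--         d[s[low]] += 1
--     else:
--         d[s[low]] = 1
--     return d
-- ===== SOURCE B (Python) =====
-- def appearances(s, low, high):
--     d = {}
--     i = high
--     while True:
--         c = s[i]
--         d[c] = d.get(c, 0) + 1
--         if i == low:
--             return d
--         i -= 1
-- ===== Notes on version B (the rewrite author's own statement) =====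
-- stated objective: simpler
-- what changed: Replaces A's O(high-low)-deep recursion (which unwinds from high down to low) with a single iterative countdown loop accumulating counts in a dict via d.get, producing the identical dict including insertion order.
import Mathlib
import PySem

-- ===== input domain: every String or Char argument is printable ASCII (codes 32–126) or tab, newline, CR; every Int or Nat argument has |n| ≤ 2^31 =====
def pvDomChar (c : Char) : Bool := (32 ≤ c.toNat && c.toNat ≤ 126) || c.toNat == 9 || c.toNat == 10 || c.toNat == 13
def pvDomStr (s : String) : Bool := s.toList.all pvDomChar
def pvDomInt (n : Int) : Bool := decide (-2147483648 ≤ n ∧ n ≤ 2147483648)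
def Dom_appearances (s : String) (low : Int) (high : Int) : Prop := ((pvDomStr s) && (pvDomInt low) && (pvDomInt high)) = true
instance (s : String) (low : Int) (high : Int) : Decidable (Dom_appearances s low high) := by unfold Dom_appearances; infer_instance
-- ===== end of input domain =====

-- B replaces A's deep recursion (which unwinds from high down to low) with a single iterative
-- countdown do-while loop accumulating counts in a dict; same result including insertion order.


-- ===== PORT A =====
-- A recurses from low towards high; fuel = high - low steps (Python diverges when low > high,
-- and raises IndexError on out-of-range indices: both are excluded by Pre_; the 'none' arms
-- below are unreachable inside Pre_).
def appearancesAux (s : String) (low : Int) : Nat → PySem.Dict String Int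
  | 0 =>
    match PySem.Str.pyGet? s low with
    | some c => (PySem.Dict.empty).insert (String.ofList [c]) 1
    | none => PySem.Dict.empty
  | n+1 =>
    let d := appearancesAux s (low + 1) n
    match PySem.Str.pyGet? s low with
    | some c =>
      let k := String.ofList [c]
      if d.contains k then d.insert k (d.getD k 0 + 1) else d.insert k 1
    | none => d

def appearances (s : String) (low : Int) (high : Int) : List (String × Int) :=
  (appearancesAux s low (high - low).toNat).items

-- ===== PORT B =====
-- the do-while body: count s[i], stop when i has reached low, else continue with i - 1;
-- fuel bounds the iterations ((high - low).toNat suffices inside Pre_; the fuel-exhausted and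
-- IndexError arms are unreachable there)
def appearancesLoop (s : String) (low : Int) : Nat → Int → PySem.Dict String Int → PySem.Dict String Int
  | fuel, i, d =>
    match PySem.Str.pyGet? s i with
    | none => d
    | some c =>
      let d := d.insert (String.ofList [c]) (d.getD (String.ofList [c]) 0 + 1)
      if i == low then d
      else
        match fuel with
        | 0 => d
        | n+1 => appearancesLoop s low n (i - 1) d

def appearances_alt (s : String) (low : Int) (high : Int) : List (String × Int) :=
  (appearancesLoop s low (high - low).toNat high PySem.Dict.empty).items

-- ===== PRECONDITION & SPEC =====
-- Pre_: low ≤ high (otherwise Python A recurses forever) and every index in [low, high] is a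
-- valid Python index of s (otherwise A raises IndexError).
def Pre_appearances (s : String) (low : Int) (high : Int) : Prop :=
  low ≤ high ∧ -(s.toList.length : Int) ≤ low ∧ high < (s.toList.length : Int)
instance (s : String) (low : Int) (high : Int) : Decidable (Pre_appearances s low high) := by unfold Pre_appearances; infer_instance

def pvWitness_appearances : String × Int × Int := ("abracadabra", 1, 9)

def Spec_appearances (s : String) (low : Int) (high : Int) (out : List (String × Int)) : Prop := out = appearances_alt s low high
instance (s : String) (low : Int) (high : Int) (out : List (String × Int)) : Decidable (Spec_appearances s low high out) := by unfold Spec_appearances; infer_instance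

-- ===== CLAIM (what is proved, stated in full; the proofs are below) =====
def Claim_equal_appearances : Prop := ∀ (s : String) (low : Int) (high : Int), Dom_appearances s low high → Pre_appearances s low high → Spec_appearances s low high (appearances s low high)

-- ===== LEMMAS AND PROOFS =====

-- in-range indices never raise
theorem pyGet?_isSome (s : String) (i : Int)
    (h1 : -(s.toList.length : Int) ≤ i) (h2 : i < (s.toList.length : Int)) :
    ∃ c, PySem.Str.pyGet? s i = some c := by
  cases hc : PySem.Str.pyGet? s i with
  | some c => exact ⟨c, rfl⟩
  | none =>
    exfalso
    have := hc
    simp [PySem.Str.pyGet?, PySem.List.pyGet?_eq_none_iff, PySem.Raise.InRange] at this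
    rw [String.length_toList] at h1 h2
    omega

-- B's one iteration on the accumulator
def appearancesStep (s : String) (d : PySem.Dict String Int) (i : Int) : PySem.Dict String Int :=
  match PySem.Str.pyGet? s i with
  | some c => d.insert (String.ofList [c]) (d.getD (String.ofList [c]) 0 + 1)
  | none => d

-- A's one step equals B's one step
theorem step_eq (s : String) (low : Int) (c : Char)
    (hc : PySem.Str.pyGet? s low = some c) (d : PySem.Dict String Int) :
    (if d.contains (String.ofList [c]) then
        d.insert (String.ofList [c]) (d.getD (String.ofList [c]) 0 + 1)
      else d.insert (String.ofList [c]) 1) = appearancesStep s d low := by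
  simp only [appearancesStep, hc]
  by_cases h : d.contains (String.ofList [c])
  · simp [h]
  · have hc0 : d.contains (String.ofList [c]) = false := by simpa using h
    simp [h, PySem.Dict.getD_of_not_contains d 0 hc0]

-- the countdown range splits off its last element
theorem pyRange_neg_one_snoc (a b : Int) (h : b < a) :
    PySem.List.pyRange a (b - 1) (-1) = PySem.List.pyRange a b (-1) ++ [b] := by
  rw [PySem.List.pyRange_neg_one, PySem.List.pyRange_neg_one]
  have h1 : (a - (b - 1)).toNat = (a - b).toNat + 1 := by omega
  rw [h1, List.range_succ, List.map_append]
  simp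
  omega

-- invariant for A: the recursion from low with n steps equals the fold over [low+n, …, low]
theorem aux_eq_foldl (s : String) (n : Nat) : ∀ (low : Int),
    -(s.toList.length : Int) ≤ low → low + n < (s.toList.length : Int) →
    appearancesAux s low n =
      (PySem.List.pyRange (low + n) (low - 1) (-1)).foldl (appearancesStep s) PySem.Dict.empty := by
  induction n with
  | zero =>
    intro low h1 h2
    obtain ⟨c, hc⟩ := pyGet?_isSome s low h1 (by omega)
    have hr : PySem.List.pyRange (low + (0:Nat)) (low - 1) (-1) = [low] := by
      rw [show (low + (0:Nat) : Int) = low by omega,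
          PySem.List.pyRange_neg_one_cons (by omega),
          PySem.List.pyRange_neg_one_eq_nil (by omega)]
    rw [hr]
    simp [appearancesAux, appearancesStep]
  | succ n ih =>
    intro low h1 h2
    obtain ⟨c, hc⟩ := pyGet?_isSome s low h1 (by push_cast at h2 ⊢; omega)
    have hrw : PySem.List.pyRange (low + (n+1:Nat)) (low - 1) (-1) =
        PySem.List.pyRange ((low+1) + n) ((low+1) - 1) (-1) ++ [low] := by
      have := pyRange_neg_one_snoc ((low + 1) + n) low (by omega)
      rw [show (low + (n+1:Nat) : Int) = (low+1) + n by push_cast; ring]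
      simpa using this
    rw [hrw, List.foldl_append]
    simp only [List.foldl_cons, List.foldl_nil]
    rw [← ih (low + 1) (by omega) (by push_cast at h2 ⊢; omega)]
    simp only [appearancesAux, hc]
    exact step_eq s low c hc _

-- invariant for B: the loop started at i = low + n with n units of fuel performs exactly the
-- fold of the step over [low+n, …, low]
theorem loop_eq_foldl (s : String) (n : Nat) : ∀ (low : Int) (d : PySem.Dict String Int),
    -(s.toList.length : Int) ≤ low → low + n < (s.toList.length : Int) →
    appearancesLoop s low n (low + n) d =
      (PySem.List.pyRange (low + n) (low - 1) (-1)).foldl (appearancesStep s) d := by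
  induction n with
  | zero =>
    intro low d h1 h2
    obtain ⟨c, hc⟩ := pyGet?_isSome s low h1 (by omega)
    have hr : PySem.List.pyRange (low + (0:Nat)) (low - 1) (-1) = [low] := by
      rw [show (low + (0:Nat) : Int) = low by omega,
          PySem.List.pyRange_neg_one_cons (by omega),
          PySem.List.pyRange_neg_one_eq_nil (by omega)]
    have hc' : PySem.List.pyGet? s.toList low = some c := hc
    rw [hr]
    simp [appearancesLoop, appearancesStep, hc']
  | succ n ih =>
    intro low d h1 h2
    have hi : low + ((n+1:Nat) : Int) = (low + 1) + n := by push_cast; ring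
    rw [hi] at h2 ⊢
    obtain ⟨c, hc⟩ := pyGet?_isSome s ((low + 1) + n) (by omega) h2
    have hstep : appearancesStep s d ((low + 1) + (n:Int)) =
        d.insert (String.ofList [c]) (d.getD (String.ofList [c]) 0 + 1) := by
      simp only [appearancesStep, hc]
    have hne : (((low + 1) + (n:Int)) == low) = false := by
      simp only [beq_eq_false_iff_ne, ne_eq]; omega
    have hcons : PySem.List.pyRange ((low + 1) + n) (low - 1) (-1) =
        ((low + 1) + n) :: PySem.List.pyRange (low + n) (low - 1) (-1) := by
      rw [PySem.List.pyRange_neg_one_cons (by omega)]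
      congr 2
      ring
    rw [hcons, List.foldl_cons]
    rw [appearancesLoop, hc]
    simp only [hne, Bool.false_eq_true, if_false]
    rw [hstep, show ((low + 1) + (n:Int) - 1) = low + (n:Int) by ring]
    exact ih low _ h1 (by omega)

-- ===== VERDICT (by name: the statement is the Claim_ definition above) =====
theorem appearances_spec : Claim_equal_appearances := by
  intro s low high _ hpre
  obtain ⟨hle, h1, h2⟩ := hpre
  unfold Spec_appearances appearances appearances_alt
  have hn : low + ((high - low).toNat : Int) = high := by omega
  have ha := aux_eq_foldl s (high - low).toNat low h1 (by omega)
  have hb := loop_eq_foldl s (high - low).toNat low PySem.Dict.empty h1 (by omega)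
  rw [hn] at ha hb
  rw [ha, hb]
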